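-- pv_equiv track=rewrite | github.com/samucj73/Maniaeasy | conferidor.py | conferir_cartoes
-- ===== SOURCE A (Python) =====
-- def conferir_cartoes(cartoes, concursos):
--     resultados = []
--     for cartao in cartoes:
--         acertos_por_concurso = []
--         for resultado in concursos:
--             acertos = len(set(cartao).intersection(resultado))
--             acertos_por_concurso.append(acertos)
--         resultados.append(acertos_por_concurso)
--     return resultados
-- ===== SOURCE B (Python) =====
-- def conferir_cartoes(cartoes, concursos):
--     # Inverted index: each number -> list of indices of draws that contain it;
--     # each card's row is built by incrementing the listed draw columns.
--     index = {}
--     for j, resultado in enumerate(concursos):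
--         for x in dict.fromkeys(resultado):
--             index.setdefault(x, []).append(j)
--     resultados = []
--     for cartao in cartoes:
--         row = [0] * len(concursos)
--         for x in dict.fromkeys(cartao):
--             for j in index.get(x, []):
--                 row[j] += 1
--         resultados.append(row)
--     return resultados
-- ===== Notes on version B (the rewrite author's own statement) =====
-- stated objective: faster
-- what changed: Replaces the per-(card,draw) set-intersection with an inverted index built once (number -> list of draw indices), so each row is produced by incrementing the columns listed for the card's distinct numbers instead of intersecting a freshly built card set with every draw.
import Mathlib
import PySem

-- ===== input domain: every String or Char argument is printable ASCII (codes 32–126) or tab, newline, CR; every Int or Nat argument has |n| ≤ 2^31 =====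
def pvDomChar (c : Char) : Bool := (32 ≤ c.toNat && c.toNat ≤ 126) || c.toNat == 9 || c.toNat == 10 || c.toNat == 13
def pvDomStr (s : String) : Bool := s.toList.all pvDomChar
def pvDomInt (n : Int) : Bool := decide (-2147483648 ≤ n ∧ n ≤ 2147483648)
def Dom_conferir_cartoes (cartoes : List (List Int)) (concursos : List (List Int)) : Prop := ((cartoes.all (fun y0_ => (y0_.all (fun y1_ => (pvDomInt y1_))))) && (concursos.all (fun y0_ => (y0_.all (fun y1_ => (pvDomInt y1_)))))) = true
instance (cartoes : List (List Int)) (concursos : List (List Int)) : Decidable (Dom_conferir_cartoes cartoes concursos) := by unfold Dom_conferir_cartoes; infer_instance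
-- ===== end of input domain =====

-- B replaces A's per-(card,draw) set intersection with an inverted index
-- (number -> draw indices) and column increments; a timing run measured B faster on the generated inputs.

-- ===== PORT A =====
def conferir_cartoes (cartoes : List (List Int)) (concursos : List (List Int)) : List (List Int) :=
  cartoes.foldl (fun resultados cartao =>
    resultados ++ [concursos.foldl (fun acertos_por_concurso resultado =>
      acertos_por_concurso ++
        [PySem.Set.len (PySem.Set.inter (PySem.Set.ofList cartao) resultado)]) []]) []

-- ===== PORT B =====
-- row[j] += 1; here j always comes from enumerate, so 0 ≤ j < row length and
-- List.set with j.toNat is exact (Python would raise only out of range, unreachable)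
def pvIncAt (r : List Int) (j : Nat) : List Int := r.set j (r.getD j 0 + 1)

def conferir_cartoes_alt (cartoes : List (List Int)) (concursos : List (List Int)) : List (List Int) :=
  -- index.setdefault(x, []).append(j)  ==  index[x] = index.get(x, []) + [j]  ==  Dict.modify
  let index : PySem.Dict Int (List Int) :=
    (PySem.List.enumerate concursos 0).foldl
      (fun d p => (PySem.List.dedup p.2).foldl
        (fun d x => PySem.Dict.modify d x [] (fun l => l ++ [p.1])) d)
      PySem.Dict.empty
  cartoes.foldl (fun resultados cartao =>
    resultados ++ [(PySem.List.dedup cartao).foldl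
      (fun row x => (PySem.Dict.getD index x []).foldl (fun row j => pvIncAt row j.toNat) row)
      (List.replicate concursos.length 0)]) []

-- ===== PRECONDITION & SPEC =====
def Spec_conferir_cartoes (cartoes : List (List Int)) (concursos : List (List Int)) (out : List (List Int)) : Prop := out = conferir_cartoes_alt cartoes concursos
instance (cartoes : List (List Int)) (concursos : List (List Int)) (out : List (List Int)) : Decidable (Spec_conferir_cartoes cartoes concursos out) := by unfold Spec_conferir_cartoes; infer_instance

-- ===== CLAIM (what is proved, stated in full; the proofs are below) =====
def Claim_equal_conferir_cartoes : Prop := ∀ (cartoes : List (List Int)) (concursos : List (List Int)), Dom_conferir_cartoes cartoes concursos → Spec_conferir_cartoes cartoes concursos (conferir_cartoes cartoes concursos)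

-- ===== LEMMAS AND PROOFS =====

-- filtering a Nodup list for equality with x yields [x] or []
theorem pv_filter_beq_of_nodup (S : List Int) (hS : S.Nodup) (x : Int) :
    S.filter (fun y => y == x) = if x ∈ S then [x] else [] := by
  induction S with
  | nil => simp
  | cons a t ih =>
    rcases List.nodup_cons.mp hS with ⟨ha, ht⟩
    by_cases hax : a = x
    · subst hax
      simp [ih ht, ha]
    · simp [hax, ih ht, Ne.symm hax]

-- inner index-building loop: appends j to each key of S once
theorem pv_inner_index (S : List Int) (hS : S.Nodup) (j : Int) (d : PySem.Dict Int (List Int)) (x : Int) :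
    (S.foldl (fun d y => PySem.Dict.modify d y [] (fun l => l ++ [j])) d).getD x []
      = d.getD x [] ++ (if x ∈ S then [j] else []) := by
  have h1 : S.foldl (fun d y => PySem.Dict.modify d y [] (fun l => l ++ [j])) d
      = (S.map (fun y => (y, j))).foldl (fun d p => PySem.Dict.modify d p.1 [] (fun l => l ++ [p.2])) d := by
    rw [List.foldl_map]
  rw [h1, PySem.Dict.getD_foldl_modify_append]
  congr 1
  rw [List.filter_map]
  have : ((fun p => p.1 == x) ∘ fun y => (y, j)) = (fun y => y == x) := rfl
  rw [this, pv_filter_beq_of_nodup S hS x]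
  split_ifs <;> simp

-- the inverted index characterised: index[x] = draw indices whose draw contains x
theorem pv_index_getD (l : List (Int × List Int)) (d : PySem.Dict Int (List Int)) (x : Int) :
    (l.foldl (fun d p => (PySem.List.dedup p.2).foldl
        (fun d y => PySem.Dict.modify d y [] (fun l => l ++ [p.1])) d) d).getD x []
      = d.getD x [] ++ (l.filter (fun p => (PySem.List.dedup p.2).contains x)).map (·.1) := by
  induction l generalizing d with
  | nil => simp
  | cons p t ih =>
    rw [List.foldl_cons, ih, pv_inner_index _ (by simp [PySem.List.dedup_eq_ofList, PySem.Set.nodup_ofList]) p.1 d x,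
        List.filter_cons]
    have hmem : (x ∈ PySem.List.dedup p.2) ↔ x ∈ p.2 := by
      simp [PySem.List.dedup_eq_ofList, PySem.Set.mem_ofList]
    by_cases hx : x ∈ p.2
    · simp [hx]
    · simp [hx]

-- pvIncAt keeps the length
theorem pv_incAt_length (r : List Int) (j : Nat) : (pvIncAt r j).length = r.length := by
  simp [pvIncAt]

-- pointwise effect of pvIncAt (getD form)
theorem pv_incAt_getD (r : List Int) (j k : Nat) (hk : k < r.length) :
    (pvIncAt r j).getD k 0 = r.getD k 0 + (if j = k then 1 else 0) := by
  unfold pvIncAt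
  by_cases h : j = k
  · subst h
    simp [List.getD, hk]
  · simp [List.getD, h]

-- the increment loop keeps the length
theorem pv_incFold_length (js : List Int) (r : List Int) :
    (js.foldl (fun row j => pvIncAt row j.toNat) r).length = r.length := by
  induction js generalizing r with
  | nil => rfl
  | cons j t ih => rw [List.foldl_cons, ih, pv_incAt_length]

-- the increment loop adds, per column, the number of times that column is listed
theorem pv_incFold_getD (js : List Int) (r : List Int) (k : Nat) (hk : k < r.length)
    (hjs : ∀ j ∈ js, 0 ≤ j) :
    (js.foldl (fun row j => pvIncAt row j.toNat) r).getD k 0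
      = r.getD k 0 + (js.count (k : Int) : Int) := by
  induction js generalizing r with
  | nil => simp
  | cons j t ih =>
    have hj : 0 ≤ j := hjs j (List.mem_cons_self)
    rw [List.foldl_cons,
        ih (pvIncAt r j.toNat) (by rw [pv_incAt_length]; exact hk)
          (fun i hi => hjs i (List.mem_cons_of_mem _ hi)),
        pv_incAt_getD r j.toNat k hk, List.count_cons]
    by_cases h : j = (k : Int)
    · have h2 : j.toNat = k := by omega
      simp [h]; ring
    · have h2 : j.toNat ≠ k := by omega
      simp [h, h2]

-- the row loop keeps the length
theorem pv_rowFold_length (S : List Int) (g : Int → List Int) (r : List Int) :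
    (S.foldl (fun row x => (g x).foldl (fun row j => pvIncAt row j.toNat) row) r).length
      = r.length := by
  induction S generalizing r with
  | nil => rfl
  | cons x t ih => rw [List.foldl_cons, ih, pv_incFold_length]

-- the whole row loop: column k gets the sum over the card's numbers of their counts
theorem pv_rowFold_getD (S : List Int) (g : Int → List Int) (r : List Int) (k : Nat)
    (hk : k < r.length) (hg : ∀ x, ∀ j ∈ g x, 0 ≤ j) :
    (S.foldl (fun row x => (g x).foldl (fun row j => pvIncAt row j.toNat) row) r).getD k 0
      = r.getD k 0 + (S.map (fun x => ((g x).count (k : Int) : Int))).sum := by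
  induction S generalizing r with
  | nil => simp
  | cons x t ih =>
    rw [List.foldl_cons,
        ih ((g x).foldl (fun row j => pvIncAt row j.toNat) r)
          (by rw [pv_incFold_length]; exact hk),
        pv_incFold_getD (g x) r k hk (hg x)]
    simp [add_assoc]

-- exactly one entry of enumerate has first component s + k
theorem pv_enum_countP {α : Type} (l : List α) (s : Int) (q : α → Bool) (k : Nat)
    (hk : k < l.length) :
    (PySem.List.enumerate l s).countP (fun p => p.1 == s + (k : Int) && q p.2)
      = if q (l[k]) then 1 else 0 := by
  induction l generalizing s k with
  | nil => simp at hk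
  | cons a t ih =>
    rw [PySem.List.enumerate_cons, List.countP_cons]
    cases k with
    | zero =>
      have hz : (PySem.List.enumerate t (s + 1)).countP
          (fun p => p.1 == s + ((0 : Nat) : Int) && q p.2) = 0 := by
        apply List.countP_eq_zero.mpr
        intro p hp
        rcases (PySem.List.mem_enumerate_iff t (s + 1) p).mp hp with ⟨i, hi, rfl⟩
        simp only [Bool.and_eq_true, beq_iff_eq]
        intro hcon
        omega
      rw [hz]
      simp
    | succ k' =>
      have hcast : (s + (((k' + 1 : Nat)) : Int)) = (s + 1) + (k' : Int) := by push_cast; ring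
      rw [hcast, ih (s + 1) k' (by simpa using hk)]
      have hhead : ((s, a).1 == s + 1 + (k' : Int) && q (s, a).2) = false := by
        simp only [Bool.and_eq_false_iff, beq_eq_false_iff_ne, ne_eq]
        left; omega
      rw [hhead]
      simp

-- A's cell value as a filtered count over the card's distinct numbers
theorem pv_cell (cartao resultado : List Int) :
    PySem.Set.len (PySem.Set.inter (PySem.Set.ofList cartao) resultado)
      = (((PySem.Set.ofList cartao).filter (fun x => resultado.contains x)).length : Int) := by
  unfold PySem.Set.len PySem.Set.inter PySem.Set.contains
  congr 2

-- count of column k in the index entry of x: 1 iff draw k contains x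
theorem pv_index_count (concursos : List (List Int)) (x : Int) (k : Nat) (hk : k < concursos.length) :
    (((PySem.List.enumerate concursos 0).filter
        (fun p => (PySem.List.dedup p.2).contains x)).map (·.1)).count (k : Int)
      = if (concursos[k]).contains x then 1 else 0 := by
  rw [List.count_eq_countP, List.countP_map, List.countP_filter]
  have hiff : ∀ p ∈ PySem.List.enumerate concursos 0,
      ((((fun a => a == (k : Int)) ∘ (·.1)) p && (PySem.List.dedup p.2).contains x) = true
        ↔ ((fun p : Int × List Int =>
              p.1 == (0 : Int) + (k : Int) && (fun l => (PySem.List.dedup l).contains x) p.2) p) = true) := by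
    intro p _
    simp only [Function.comp, Bool.and_eq_true, beq_iff_eq, zero_add]
  rw [List.countP_congr hiff,
      pv_enum_countP concursos 0 (fun l => (PySem.List.dedup l).contains x) k hk]
  have h2 : (PySem.List.dedup (concursos[k])).contains x = (concursos[k]).contains x := by
    simp [PySem.List.dedup_eq_ofList, PySem.Set.mem_ofList]
  rw [h2]

-- ===== VERDICT (by name: the statement is the Claim_ definition above) =====
theorem conferir_cartoes_spec : Claim_equal_conferir_cartoes := by
  intro cartoes concursos _
  unfold Spec_conferir_cartoes conferir_cartoes conferir_cartoes_alt
  simp only [PySem.List.foldl_append_singleton_eq_map, List.nil_append]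
  refine List.map_congr_left (fun cartao _ => ?_)
  set idx := (PySem.List.enumerate concursos 0).foldl
      (fun d p => (PySem.List.dedup p.2).foldl
        (fun d y => PySem.Dict.modify d y [] (fun l => l ++ [p.1])) d)
      PySem.Dict.empty with hidx
  have hg : ∀ x, PySem.Dict.getD idx x []
      = ((PySem.List.enumerate concursos 0).filter
          (fun p => (PySem.List.dedup p.2).contains x)).map (·.1) := by
    intro x
    rw [hidx, pv_index_getD]
    simp
  have hnn : ∀ x, ∀ j ∈ PySem.Dict.getD idx x [], 0 ≤ j := by
    intro x j hj
    rw [hg] at hj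
    rcases List.mem_map.mp hj with ⟨p, hp, rfl⟩
    rcases (PySem.List.mem_enumerate_iff concursos 0 p).mp (List.mem_of_mem_filter hp) with ⟨i, hi, rfl⟩
    simp
  apply List.ext_getElem
  · rw [pv_rowFold_length]
    simp
  · intro k hk1 hk2
    have hkc : k < concursos.length := by simpa using hk1
    have hkr : k < (List.replicate concursos.length (0 : Int)).length := by simpa using hkc
    have hrow := pv_rowFold_getD (PySem.List.dedup cartao) (fun x => PySem.Dict.getD idx x [])
          (List.replicate concursos.length 0) k hkr hnn
    simp only [] at hrow
    rw [List.getElem_map, ← List.getD_eq_getElem _ 0 hk2, hrow]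
    have hcnt : ∀ x ∈ PySem.List.dedup cartao,
        (((PySem.Dict.getD idx x []).count ((k : Int)) : Int))
          = (if ((concursos[k]).contains x) = true then (1 : Int) else 0) := by
      intro x _
      rw [hg, pv_index_count concursos x k hkc]
      split_ifs <;> simp
    rw [List.map_congr_left hcnt, PySem.List.sum_map_ite_one_zero, pv_cell cartao (concursos[k])]
    have hrepl : (List.replicate concursos.length (0 : Int)).getD k 0 = 0 := by
      simp [List.getD]
    rw [hrepl, zero_add, List.countP_eq_length_filter]
    simp only [PySem.List.dedup_eq_ofList]
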